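-- pv_equiv track=rewrite | github.com/Don-Paterson/CHKP-VSX-Diagnostics | python/vsx_diagnostics_py/delta/comparator.py | _set_diff_pnotes
-- ===== SOURCE A (Python) =====
-- from typing import Any, Dict, List, Optional, Tuple
--
-- def _set_diff_pnotes(
--     prev_list: List[dict],
--     curr_list: List[dict],
-- ) -> Tuple[List[dict], List[dict], List[dict]]:
--     """
--     Return (new_pnotes, resolved_pnotes, changed_pnotes).
--     - new: name in curr only
--     - resolved: name in prev only
--     - changed: name in both but status differs
--     """
--     prev_by_name = {p.get("name", ""): p for p in prev_list}
--     curr_by_name = {p.get("name", ""): p for p in curr_list}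
--
--     new_names      = set(curr_by_name) - set(prev_by_name)
--     resolved_names = set(prev_by_name) - set(curr_by_name)
--     common_names   = set(prev_by_name) & set(curr_by_name)
--
--     changed = [
--         {"name": n,
--          "prev_status": prev_by_name[n].get("status", ""),
--          "curr_status": curr_by_name[n].get("status", "")}
--         for n in sorted(common_names)
--         if prev_by_name[n].get("status") != curr_by_name[n].get("status")
--     ]
--
--     return (
--         [curr_by_name[n] for n in sorted(new_names)],
--         [prev_by_name[n] for n in sorted(resolved_names)],
--         changed,
--     )
-- ===== SOURCE B (Python) =====
-- from typing import Dict, List, Tuple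
--
-- def _set_diff_pnotes(
--     prev_list: List[dict],
--     curr_list: List[dict],
-- ) -> Tuple[List[dict], List[dict], List[dict]]:
--     """Sort-merge join: sort each side's (name, pnote) items by name once, then a
--     two-pointer merge classifies names into new/resolved/changed with no set algebra."""
--     prev_by_name = {p.get("name", ""): p for p in prev_list}
--     curr_by_name = {p.get("name", ""): p for p in curr_list}
--     prev_items = sorted(prev_by_name.items(), key=lambda kv: kv[0])
--     curr_items = sorted(curr_by_name.items(), key=lambda kv: kv[0])
--
--     new, resolved, changed = [], [], []
--     i = j = 0
--     while i < len(prev_items) and j < len(curr_items):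
--         pn, p = prev_items[i]
--         cn, c = curr_items[j]
--         if pn < cn:
--             resolved.append(p)
--             i += 1
--         elif cn < pn:
--             new.append(c)
--             j += 1
--         else:
--             if p.get("status") != c.get("status"):
--                 changed.append({"name": pn,
--                                 "prev_status": p.get("status", ""),
--                                 "curr_status": c.get("status", "")})
--             i += 1
--             j += 1
--     while i < len(prev_items):
--         resolved.append(prev_items[i][1])
--         i += 1
--     while j < len(curr_items):
--         new.append(curr_items[j][1])
--         j += 1
--     return new, resolved, changed
-- ===== Notes on version B (the rewrite author's own statement) =====
-- stated objective: alternative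
-- what changed: A partitions names by set difference/intersection and sorts three derived name sets; B instead sorts each side's items once and classifies names with a two-pointer sort-merge join, never forming name sets at all.
import Mathlib
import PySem

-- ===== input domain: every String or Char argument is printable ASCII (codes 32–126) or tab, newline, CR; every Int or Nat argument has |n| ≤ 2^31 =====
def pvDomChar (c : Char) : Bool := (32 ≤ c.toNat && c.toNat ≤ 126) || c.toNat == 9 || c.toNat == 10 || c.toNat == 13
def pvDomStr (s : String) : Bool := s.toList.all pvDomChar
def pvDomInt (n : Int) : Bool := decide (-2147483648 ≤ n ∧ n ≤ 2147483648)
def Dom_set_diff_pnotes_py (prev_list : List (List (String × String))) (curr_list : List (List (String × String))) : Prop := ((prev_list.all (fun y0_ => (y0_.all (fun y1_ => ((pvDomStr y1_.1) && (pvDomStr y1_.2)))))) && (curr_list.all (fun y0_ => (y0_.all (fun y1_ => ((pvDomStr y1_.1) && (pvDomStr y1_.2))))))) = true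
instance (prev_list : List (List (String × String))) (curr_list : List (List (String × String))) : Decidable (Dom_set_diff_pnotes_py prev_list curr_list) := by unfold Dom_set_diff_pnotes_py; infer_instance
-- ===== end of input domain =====

-- B replaces A's set-difference/intersection passes by a two-pointer sort-merge join of the
-- two name-sorted item lists (objective: alternative algorithm, same asymptotic cost).

-- ===== PORT A =====
-- p.get(k) on an input dict (association list, first match wins)
def pvGet (p : List (String × String)) (k : String) : Option String :=
  (p.find? (fun kv => kv.1 == k)).map (·.2)

-- p.get(k, d)
def pvGetD (p : List (String × String)) (k : String) (d : String) : String :=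
  (pvGet p k).getD d

-- the dict literal {"name": n, "prev_status": …, "curr_status": …}
def pvChanged (n : String) (p c : List (String × String)) : List (String × String) :=
  [("name", n), ("prev_status", pvGetD p "status" ""), ("curr_status", pvGetD c "status" "")]

def set_diff_pnotes_py (prev_list : List (List (String × String))) (curr_list : List (List (String × String))) : (List (List (String × String))) × (List (List (String × String))) × (List (List (String × String))) :=
  let prevD : PySem.Dict String (List (String × String)) :=
    prev_list.foldl (fun d p => d.insert (pvGetD p "name" "") p) PySem.Dict.empty
  let currD : PySem.Dict String (List (String × String)) :=
    curr_list.foldl (fun d p => d.insert (pvGetD p "name" "") p) PySem.Dict.empty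
  let newNames := PySem.Set.diff (PySem.Set.ofList currD.keys) (PySem.Set.ofList prevD.keys)
  let resolvedNames := PySem.Set.diff (PySem.Set.ofList prevD.keys) (PySem.Set.ofList currD.keys)
  let commonNames := PySem.Set.inter (PySem.Set.ofList prevD.keys) (PySem.Set.ofList currD.keys)
  -- prev_by_name[n] / curr_by_name[n] are total here: n is a key; getD [] is only a totality default
  let changed := (PySem.List.sorted commonNames (fun x => x) false).filterMap (fun n =>
    if pvGet (prevD.getD n []) "status" ≠ pvGet (currD.getD n []) "status"
    then some (pvChanged n (prevD.getD n []) (currD.getD n [])) else none)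
  ((PySem.List.sorted newNames (fun x => x) false).map (fun n => currD.getD n []),
   (PySem.List.sorted resolvedNames (fun x => x) false).map (fun n => prevD.getD n []),
   changed)

-- ===== PORT B =====
-- the two-pointer while loop of Source B (incrementing i / j = recursing on the tail),
-- plus the two trailing drain loops as the fall-through case
def pvMergeLoop (ps cs : List (String × List (String × String)))
    (acc : (List (List (String × String))) × (List (List (String × String))) × (List (List (String × String)))) :
    (List (List (String × String))) × (List (List (String × String))) × (List (List (String × String))) :=
  match ps, cs with
  | (pn, p) :: pt, (cn, c) :: ct =>
    if pn < cn then pvMergeLoop pt ((cn, c) :: ct) (acc.1, acc.2.1 ++ [p], acc.2.2)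
    else if cn < pn then pvMergeLoop ((pn, p) :: pt) ct (acc.1 ++ [c], acc.2.1, acc.2.2)
    else if pvGet p "status" ≠ pvGet c "status" then
      pvMergeLoop pt ct (acc.1, acc.2.1, acc.2.2 ++ [pvChanged pn p c])
    else pvMergeLoop pt ct acc
  | ps, cs => (acc.1 ++ cs.map (·.2), acc.2.1 ++ ps.map (·.2), acc.2.2)
termination_by ps.length + cs.length
decreasing_by all_goals simp <;> omega

def set_diff_pnotes_py_alt (prev_list : List (List (String × String))) (curr_list : List (List (String × String))) : (List (List (String × String))) × (List (List (String × String))) × (List (List (String × String))) :=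
  let prevD : PySem.Dict String (List (String × String)) :=
    prev_list.foldl (fun d p => d.insert (pvGetD p "name" "") p) PySem.Dict.empty
  let currD : PySem.Dict String (List (String × String)) :=
    curr_list.foldl (fun d p => d.insert (pvGetD p "name" "") p) PySem.Dict.empty
  let prevItems := PySem.List.sorted prevD.items (fun kv => kv.1) false
  let currItems := PySem.List.sorted currD.items (fun kv => kv.1) false
  pvMergeLoop prevItems currItems ([], [], [])

-- ===== PRECONDITION & SPEC =====
def Spec_set_diff_pnotes_py (prev_list : List (List (String × String))) (curr_list : List (List (String × String))) (out : (List (List (String × String))) × (List (List (String × String))) × (List (List (String × String)))) : Prop := out = set_diff_pnotes_py_alt prev_list curr_list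
instance (prev_list : List (List (String × String))) (curr_list : List (List (String × String))) (out : (List (List (String × String))) × (List (List (String × String))) × (List (List (String × String)))) : Decidable (Spec_set_diff_pnotes_py prev_list curr_list out) := by unfold Spec_set_diff_pnotes_py; infer_instance

-- ===== CLAIM (what is proved, stated in full; the proofs are below) =====
def Claim_equal_set_diff_pnotes_py : Prop := ∀ (prev_list : List (List (String × String))) (curr_list : List (List (String × String))), Dom_set_diff_pnotes_py prev_list curr_list → Spec_set_diff_pnotes_py prev_list curr_list (set_diff_pnotes_py prev_list curr_list)

-- ===== LEMMAS AND PROOFS =====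

-- proof-side: the dict build both ports perform
def pvMkD (l : List (List (String × String))) : PySem.Dict String (List (String × String)) :=
  l.foldl (fun d p => d.insert (pvGetD p "name" "") p) PySem.Dict.empty

-- proof-side bridge: one classifying fold over a name list (the common reference shape)
def pvFoldClassify (d e : PySem.Dict String (List (String × String))) (names : List String)
    (acc : (List (List (String × String))) × (List (List (String × String))) × (List (List (String × String)))) :
    (List (List (String × String))) × (List (List (String × String))) × (List (List (String × String))) :=
  names.foldl (fun acc n =>
    match d.get? n, e.get? n with
    | none, some c => (acc.1 ++ [c], acc.2.1, acc.2.2)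
    | some p, none => (acc.1, acc.2.1 ++ [p], acc.2.2)
    | some p, some c =>
        if pvGet p "status" ≠ pvGet c "status"
        then (acc.1, acc.2.1, acc.2.2 ++ [pvChanged n p c]) else acc
    | none, none => acc) acc

-- proof-side: merged key list of the two sorted item lists
def pvKeyMerge : List String → List String → List String
  | [], ys => ys
  | x :: xt, [] => x :: xt
  | x :: xt, y :: yt =>
    if x < y then x :: pvKeyMerge xt (y :: yt)
    else if y < x then y :: pvKeyMerge (x :: xt) yt
    else x :: pvKeyMerge xt yt
termination_by xs ys => xs.length + ys.length
decreasing_by all_goals simp <;> omega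

theorem pv_mem_keyMerge (n : String) (xs ys : List String) :
    n ∈ pvKeyMerge xs ys ↔ n ∈ xs ∨ n ∈ ys := by
  induction xs, ys using pvKeyMerge.induct with
  | case1 ys => simp [pvKeyMerge]
  | case2 x xt => simp [pvKeyMerge]
  | case3 x xt y yt h1 ih => rw [pvKeyMerge]; simp only [if_pos h1, List.mem_cons, ih]; tauto
  | case4 x xt y yt h1 h2 ih =>
      rw [pvKeyMerge]; rw [if_neg h1, if_pos h2]; simp only [List.mem_cons, ih]; tauto
  | case5 x xt y yt h1 h2 ih =>
      have hxy : x = y := le_antisymm (not_lt.mp h2) (not_lt.mp h1)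
      subst hxy
      rw [pvKeyMerge]; rw [if_neg h1, if_neg h2]; simp only [List.mem_cons, ih]; tauto

theorem pv_pairwise_keyMerge (xs ys : List String)
    (hx : xs.Pairwise (· < ·)) (hy : ys.Pairwise (· < ·)) :
    (pvKeyMerge xs ys).Pairwise (· < ·) := by
  induction xs, ys using pvKeyMerge.induct with
  | case1 ys => simpa [pvKeyMerge] using hy
  | case2 x xt => simpa [pvKeyMerge] using hx
  | case3 x xt y yt h1 ih =>
      rw [List.pairwise_cons] at hx hy
      rw [pvKeyMerge, if_pos h1]
      refine List.pairwise_cons.mpr ⟨?_, ih hx.2 (List.pairwise_cons.mpr hy)⟩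
      intro a ha
      rcases (pv_mem_keyMerge a xt (y :: yt)).mp ha with h | h
      · exact hx.1 a h
      · rcases List.mem_cons.mp h with h | h
        · exact h ▸ h1
        · exact lt_trans h1 (hy.1 a h)
  | case4 x xt y yt h1 h2 ih =>
      rw [List.pairwise_cons] at hx hy
      rw [pvKeyMerge, if_neg h1, if_pos h2]
      refine List.pairwise_cons.mpr ⟨?_, ih (List.pairwise_cons.mpr hx) hy.2⟩
      intro a ha
      rcases (pv_mem_keyMerge a (x :: xt) yt).mp ha with h | h
      · rcases List.mem_cons.mp h with h | h
        · exact h ▸ h2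
        · exact lt_trans h2 (hx.1 a h)
      · exact hy.1 a h
  | case5 x xt y yt h1 h2 ih =>
      have hxy : x = y := le_antisymm (not_lt.mp h2) (not_lt.mp h1)
      subst hxy
      rw [List.pairwise_cons] at hx hy
      rw [pvKeyMerge, if_neg h1, if_neg h2]
      refine List.pairwise_cons.mpr ⟨?_, ih hx.2 hy.2⟩
      intro a ha
      rcases (pv_mem_keyMerge a xt yt).mp ha with h | h
      · exact hx.1 a h
      · exact hy.1 a h

-- fold over keys present only in e: every step takes the "new" branch
theorem pv_fold_right_only (d e : PySem.Dict String (List (String × String)))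
    (cs : List (String × List (String × String)))
    (hc : ∀ x ∈ cs, d.get? x.1 = none ∧ e.get? x.1 = some x.2) :
    ∀ acc, pvFoldClassify d e (cs.map (·.1)) acc = (acc.1 ++ cs.map (·.2), acc.2.1, acc.2.2) := by
  induction cs with
  | nil => intro acc; simp [pvFoldClassify]
  | cons x t ih =>
    intro acc
    have hx := hc x (by simp)
    have ht : ∀ y ∈ t, d.get? y.1 = none ∧ e.get? y.1 = some y.2 := fun y hy => hc y (by simp [hy])
    simp only [List.map_cons, pvFoldClassify, List.foldl_cons, hx.1, hx.2]
    simpa [pvFoldClassify] using ih ht (acc.1 ++ [x.2], acc.2.1, acc.2.2)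

-- fold over keys present only in d: every step takes the "resolved" branch
theorem pv_fold_left_only (d e : PySem.Dict String (List (String × String)))
    (ps : List (String × List (String × String)))
    (hp : ∀ x ∈ ps, d.get? x.1 = some x.2 ∧ e.get? x.1 = none) :
    ∀ acc, pvFoldClassify d e (ps.map (·.1)) acc = (acc.1, acc.2.1 ++ ps.map (·.2), acc.2.2) := by
  induction ps with
  | nil => intro acc; simp [pvFoldClassify]
  | cons x t ih =>
    intro acc
    have hx := hp x (by simp)
    have ht : ∀ y ∈ t, d.get? y.1 = some y.2 ∧ e.get? y.1 = none := fun y hy => hp y (by simp [hy])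
    simp only [List.map_cons, pvFoldClassify, List.foldl_cons, hx.1, hx.2]
    simpa [pvFoldClassify] using ih ht (acc.1, acc.2.1 ++ [x.2], acc.2.2)

-- the merge loop equals one classifying fold over the merged key list
theorem pv_merge_eq_fold (d e : PySem.Dict String (List (String × String))) :
    ∀ (ps cs : List (String × List (String × String))),
    (ps.map (·.1)).Pairwise (· < ·) → (cs.map (·.1)).Pairwise (· < ·) →
    (∀ x ∈ ps, d.get? x.1 = some x.2) → (∀ x ∈ cs, e.get? x.1 = some x.2) →
    (∀ x ∈ cs, d.get? x.1 = none ∨ x.1 ∈ ps.map (·.1)) →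
    (∀ x ∈ ps, e.get? x.1 = none ∨ x.1 ∈ cs.map (·.1)) →
    ∀ acc, pvMergeLoop ps cs acc = pvFoldClassify d e (pvKeyMerge (ps.map (·.1)) (cs.map (·.1))) acc
  | [], cs, _, _, _, hc, hdc, _ => by
    intro acc
    have hco : ∀ x ∈ cs, d.get? x.1 = none ∧ e.get? x.1 = some x.2 := by
      intro x hx
      refine ⟨?_, hc x hx⟩
      rcases hdc x hx with h | h
      · exact h
      · simp at h
    simp only [pvMergeLoop, List.map_nil, pvKeyMerge]
    rw [pv_fold_right_only d e cs hco acc]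
    simp
  | (pn, p) :: pt, [], _, _, hp, _, _, hep => by
    intro acc
    have hpo : ∀ x ∈ (pn, p) :: pt, d.get? x.1 = some x.2 ∧ e.get? x.1 = none := by
      intro x hx
      refine ⟨hp x hx, ?_⟩
      rcases hep x hx with h | h
      · exact h
      · simp at h
    simp only [pvMergeLoop, List.map_cons, List.map_nil, pvKeyMerge]
    rw [show (pn :: pt.map (·.1)) = (((pn, p) :: pt).map (·.1)) by simp,
        pv_fold_left_only d e _ hpo acc]
    simp
  | (pn, p) :: pt, (cn, c) :: ct, hps, hcs, hp, hc, hdc, hep => by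
    intro acc
    rw [List.map_cons, List.pairwise_cons] at hps hcs
    have hdp : d.get? pn = some p := hp (pn, p) (by simp)
    have hecn : e.get? cn = some c := hc (cn, c) (by simp)
    simp only [pvMergeLoop, List.map_cons, pvKeyMerge]
    split_ifs with h1 h2 hst
    · -- pn < cn : pn is resolved
      have hgt : ∀ x ∈ (cn, c) :: ct, pn < x.1 := by
        intro x hx
        rcases List.mem_cons.mp hx with hx1 | hx1
        · rw [hx1]; exact h1
        · exact lt_trans h1 (hcs.1 x.1 (List.mem_map_of_mem hx1))
      have hepn : e.get? pn = none := by
        rcases hep (pn, p) (by simp) with h | h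
        · exact h
        · rw [List.map_cons, List.mem_cons] at h
          rcases h with h | h
          · exact absurd h (ne_of_lt h1)
          · rcases List.mem_map.mp h with ⟨y, hy, hk⟩
            exact absurd (lt_of_lt_of_eq (hgt y (by simp [hy])) hk) (lt_irrefl pn)
      rw [pv_merge_eq_fold d e pt ((cn, c) :: ct) hps.2
            (by rw [List.map_cons]; exact List.pairwise_cons.mpr hcs)
            (fun x hx => hp x (by simp [hx])) hc
            (fun x hx => by
              rcases hdc x hx with h | h
              · exact Or.inl h
              · rw [List.map_cons, List.mem_cons] at h
                rcases h with h | h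
                · exact absurd (lt_of_lt_of_eq (hgt x hx) h) (lt_irrefl pn)
                · exact Or.inr h)
            (fun x hx => hep x (by simp [hx]))]
      simp only [pvFoldClassify, List.foldl_cons, List.map_cons, hdp, hepn]
    · -- cn < pn : cn is new
      have hgt : ∀ x ∈ (pn, p) :: pt, cn < x.1 := by
        intro x hx
        rcases List.mem_cons.mp hx with hx1 | hx1
        · rw [hx1]; exact h2
        · exact lt_trans h2 (hps.1 x.1 (List.mem_map_of_mem hx1))
      have hdcn : d.get? cn = none := by
        rcases hdc (cn, c) (by simp) with h | h
        · exact h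
        · rw [List.map_cons, List.mem_cons] at h
          rcases h with h | h
          · exact absurd h (ne_of_lt h2)
          · rcases List.mem_map.mp h with ⟨y, hy, hk⟩
            exact absurd (lt_of_lt_of_eq (hgt y (by simp [hy])) hk) (lt_irrefl cn)
      rw [pv_merge_eq_fold d e ((pn, p) :: pt) ct
            (by rw [List.map_cons]; exact List.pairwise_cons.mpr hps) hcs.2
            hp (fun x hx => hc x (by simp [hx]))
            (fun x hx => hdc x (by simp [hx]))
            (fun x hx => by
              rcases hep x hx with h | h
              · exact Or.inl h
              · rw [List.map_cons, List.mem_cons] at h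
                rcases h with h | h
                · exact absurd (lt_of_lt_of_eq (hgt x hx) h) (lt_irrefl cn)
                · exact Or.inr h)]
      simp only [pvFoldClassify, List.foldl_cons, List.map_cons, hdcn, hecn]
    · -- pn = cn, statuses differ
      have hpc : pn = cn := le_antisymm (not_lt.mp h2) (not_lt.mp h1)
      subst hpc
      rw [pv_merge_eq_fold d e pt ct hps.2 hcs.2
            (fun x hx => hp x (by simp [hx])) (fun x hx => hc x (by simp [hx]))
            (fun x hx => by
              rcases hdc x (by simp [hx]) with h | h
              · exact Or.inl h
              · rw [List.map_cons, List.mem_cons] at h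
                rcases h with h | h
                · exact absurd (lt_of_lt_of_eq (hcs.1 x.1 (List.mem_map_of_mem hx)) h) (lt_irrefl pn)
                · exact Or.inr h)
            (fun x hx => by
              rcases hep x (by simp [hx]) with h | h
              · exact Or.inl h
              · rw [List.map_cons, List.mem_cons] at h
                rcases h with h | h
                · exact absurd (lt_of_lt_of_eq (hps.1 x.1 (List.mem_map_of_mem hx)) h) (lt_irrefl pn)
                · exact Or.inr h)]
      simp only [pvFoldClassify, List.foldl_cons, hdp, hecn, if_pos hst]
    · -- pn = cn, statuses equal
      have hpc : pn = cn := le_antisymm (not_lt.mp h2) (not_lt.mp h1)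
      subst hpc
      rw [pv_merge_eq_fold d e pt ct hps.2 hcs.2
            (fun x hx => hp x (by simp [hx])) (fun x hx => hc x (by simp [hx]))
            (fun x hx => by
              rcases hdc x (by simp [hx]) with h | h
              · exact Or.inl h
              · rw [List.map_cons, List.mem_cons] at h
                rcases h with h | h
                · exact absurd (lt_of_lt_of_eq (hcs.1 x.1 (List.mem_map_of_mem hx)) h) (lt_irrefl pn)
                · exact Or.inr h)
            (fun x hx => by
              rcases hep x (by simp [hx]) with h | h
              · exact Or.inl h
              · rw [List.map_cons, List.mem_cons] at h
                rcases h with h | h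
                · exact absurd (lt_of_lt_of_eq (hps.1 x.1 (List.mem_map_of_mem hx)) h) (lt_irrefl pn)
                · exact Or.inr h)]
      simp only [pvFoldClassify, List.foldl_cons, hdp, hecn, if_neg hst]
termination_by ps cs => ps.length + cs.length
decreasing_by all_goals simp <;> omega

-- generic: filterMap of an if-some is map-over-filter
theorem pv_filterMap_ite {α β : Type} (q : α → Bool) (g : α → β) (l : List α) :
    l.filterMap (fun x => if q x then some (g x) else none) = (l.filter q).map g := by
  induction l with
  | nil => rfl
  | cons a t ih => by_cases h : q a <;> simp [h, ih]

-- generic: filterMap of an if-gated f is filterMap-over-filter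
theorem pv_filterMap_ite_none {α β : Type} (q : α → Bool) (f : α → Option β) (l : List α) :
    l.filterMap (fun x => if q x then f x else none) = (l.filter q).filterMap f := by
  induction l with
  | nil => rfl
  | cons a t ih => by_cases h : q a <;> simp [List.filterMap_cons, h, ih]

-- sorting a sub-set s of u equals filtering the sorted u by the defining predicate of s
theorem pv_sorted_filter (q : String → Bool) (s u : List String)
    (hs : s.Nodup) (hu : u.Nodup)
    (h : ∀ x, x ∈ s ↔ x ∈ u ∧ q x = true) :
    PySem.List.sorted s (fun x => x) false = (PySem.List.sorted u (fun x => x) false).filter q := by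
  have hperm_u : (PySem.List.sorted u (fun x => x) false).Perm u := PySem.List.sorted_perm u _ false
  have hnd_u : (PySem.List.sorted u (fun x => x) false).Nodup := hperm_u.nodup_iff.mpr hu
  have hle : (PySem.List.sorted u (fun x => x) false).Pairwise (fun a b => a ≤ b) :=
    PySem.List.sorted_pairwise u (fun x => x)
  have hlt : (PySem.List.sorted u (fun x => x) false).Pairwise (· < ·) :=
    (hnd_u.imp₂ (fun _ _ hne hle => lt_of_le_of_ne hle hne) hle).imp (fun h => h)
  apply PySem.List.sorted_eq_of_perm_of_pairwise_lt
  · apply (List.perm_ext_iff_of_nodup (hnd_u.filter q) hs).mpr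
    intro x
    simp only [List.mem_filter, PySem.List.mem_sorted, h x]
  · exact hlt.filter q

-- unrolling the classifying fold into three filterMaps
theorem pv_foldB (d e : PySem.Dict String (List (String × String)))
    (names : List String) (acc : (List (List (String × String))) × (List (List (String × String))) × (List (List (String × String)))) :
    pvFoldClassify d e names acc =
    (acc.1 ++ names.filterMap (fun n => match d.get? n, e.get? n with
        | none, some c => some c | _, _ => none),
     acc.2.1 ++ names.filterMap (fun n => match d.get? n, e.get? n with
        | some p, none => some p | _, _ => none),
     acc.2.2 ++ names.filterMap (fun n => match d.get? n, e.get? n with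
        | some p, some c => if pvGet p "status" ≠ pvGet c "status" then some (pvChanged n p c) else none
        | _, _ => none)) := by
  induction names generalizing acc with
  | nil => simp [pvFoldClassify]
  | cons n t ih =>
    simp only [pvFoldClassify, List.foldl_cons, List.filterMap_cons]
    rcases hd : d.get? n with _ | p <;> rcases he : e.get? n with _ | c
    · simpa [pvFoldClassify] using ih acc
    · simpa [pvFoldClassify] using ih (acc.1 ++ [c], acc.2.1, acc.2.2)
    · simpa [pvFoldClassify] using ih (acc.1, acc.2.1 ++ [p], acc.2.2)
    · by_cases hst : pvGet p "status" ≠ pvGet c "status"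
      · simpa [pvFoldClassify, hst] using ih (acc.1, acc.2.1, acc.2.2 ++ [pvChanged n p c])
      · simpa [pvFoldClassify, hst] using ih acc

-- A equals the classifying fold over the sorted union of names
theorem pv_A_eq_fold (prev_list curr_list : List (List (String × String))) :
    set_diff_pnotes_py prev_list curr_list =
    pvFoldClassify (pvMkD prev_list) (pvMkD curr_list)
      (PySem.List.sorted
        (PySem.Set.union (PySem.Set.ofList (pvMkD prev_list).keys) (PySem.Set.ofList (pvMkD curr_list).keys))
        (fun x => x) false) ([], [], []) := by
  unfold set_diff_pnotes_py
  set d : PySem.Dict String (List (String × String)) := pvMkD prev_list with hd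
  set e : PySem.Dict String (List (String × String)) := pvMkD curr_list with he
  have hdnd : d.keys.Nodup := by
    rw [hd]
    exact PySem.Dict.nodup_keys_foldl_insert_key prev_list (fun p => pvGetD p "name" "") _ _
      PySem.Dict.nodup_keys_empty
  have hend : e.keys.Nodup := by
    rw [he]
    exact PySem.Dict.nodup_keys_foldl_insert_key curr_list (fun p => pvGetD p "name" "") _ _
      PySem.Dict.nodup_keys_empty
  have hund : (PySem.Set.union (PySem.Set.ofList d.keys) (PySem.Set.ofList e.keys)).Nodup :=
    PySem.Set.nodup_union _ _ (PySem.Set.nodup_ofList _)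
  rw [pv_foldB d e]
  refine Prod.ext ?_ (Prod.ext ?_ ?_)
  · show (PySem.List.sorted (PySem.Set.diff (PySem.Set.ofList e.keys) (PySem.Set.ofList d.keys)) (fun x => x) false).map (fun n => e.getD n []) = _
    rw [pv_sorted_filter (fun n => !d.contains n && e.contains n) _ _
      (PySem.Set.nodup_diff _ _ (PySem.Set.nodup_ofList _)) hund ?_]
    · rw [← pv_filterMap_ite (fun n => !d.contains n && e.contains n) (fun n => e.getD n [])]
      simp only [List.nil_append]
      apply List.filterMap_congr
      intro n _
      rcases h1 : d.get? n with _ | p <;> rcases h2 : e.get? n with _ | c <;>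
        simp_all [PySem.Dict.contains_eq_isSome_get?, PySem.Dict.getD_eq_get?_getD]
    · intro x
      simp only [PySem.Set.mem_diff, PySem.Set.mem_union, PySem.Set.mem_ofList,
        ← PySem.Dict.contains_iff_mem_keys, Bool.and_eq_true, Bool.not_eq_true']
      cases hdc : d.contains x <;> cases hec : e.contains x <;> simp
  · show (PySem.List.sorted (PySem.Set.diff (PySem.Set.ofList d.keys) (PySem.Set.ofList e.keys)) (fun x => x) false).map (fun n => d.getD n []) = _
    rw [pv_sorted_filter (fun n => d.contains n && !e.contains n) _ _
      (PySem.Set.nodup_diff _ _ (PySem.Set.nodup_ofList _)) hund ?_]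
    · rw [← pv_filterMap_ite (fun n => d.contains n && !e.contains n) (fun n => d.getD n [])]
      simp only [List.nil_append]
      apply List.filterMap_congr
      intro n _
      rcases h1 : d.get? n with _ | p <;> rcases h2 : e.get? n with _ | c <;>
        simp_all [PySem.Dict.contains_eq_isSome_get?, PySem.Dict.getD_eq_get?_getD]
    · intro x
      simp only [PySem.Set.mem_diff, PySem.Set.mem_union, PySem.Set.mem_ofList,
        ← PySem.Dict.contains_iff_mem_keys, Bool.and_eq_true, Bool.not_eq_true']
      cases hdc : d.contains x <;> cases hec : e.contains x <;> simp
  · show (PySem.List.sorted (PySem.Set.inter (PySem.Set.ofList d.keys) (PySem.Set.ofList e.keys)) (fun x => x) false).filterMap (fun n =>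
        if pvGet (d.getD n []) "status" ≠ pvGet (e.getD n []) "status"
        then some (pvChanged n (d.getD n []) (e.getD n [])) else none) = _
    rw [pv_sorted_filter (fun n => d.contains n && e.contains n) _ _
      (PySem.Set.nodup_inter _ _ (PySem.Set.nodup_ofList _)) hund ?_]
    · rw [← pv_filterMap_ite_none (fun n => d.contains n && e.contains n)]
      simp only [List.nil_append]
      apply List.filterMap_congr
      intro n _
      rcases h1 : d.get? n with _ | p <;> rcases h2 : e.get? n with _ | c <;>
        simp_all [PySem.Dict.contains_eq_isSome_get?, PySem.Dict.getD_eq_get?_getD]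
    · intro x
      simp only [PySem.Set.mem_inter, PySem.Set.mem_union, PySem.Set.mem_ofList,
        ← PySem.Dict.contains_iff_mem_keys, Bool.and_eq_true]
      cases hdc : d.contains x <;> cases hec : e.contains x <;> simp

-- strictly increasing key list of a nodup-key dict's sorted items
theorem pv_sorted_items_strict (d : PySem.Dict String (List (String × String)))
    (hnd : d.keys.Nodup) :
    ((PySem.List.sorted d.items (fun kv => kv.1) false).map (·.1)).Pairwise (· < ·) := by
  have hperm : (PySem.List.sorted d.items (fun kv => kv.1) false).Perm d.items :=
    PySem.List.sorted_perm _ _ _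
  have hkeys : d.keys = d.items.map (·.1) := by simp only [PySem.Dict.keys]
  have hndmap : ((PySem.List.sorted d.items (fun kv => kv.1) false).map (·.1)).Nodup :=
    ((hperm.map (·.1)).nodup_iff).mpr (hkeys ▸ hnd)
  have hle : ((PySem.List.sorted d.items (fun kv => kv.1) false).map (·.1)).Pairwise (· ≤ ·) :=
    PySem.List.sorted_map_key_pairwise _ _
  exact (hndmap.imp₂ (fun _ _ hne hle => lt_of_le_of_ne hle hne) hle).imp (fun h => h)

-- B equals the same classifying fold over the sorted union of names
theorem pv_B_eq_fold (prev_list curr_list : List (List (String × String))) :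
    set_diff_pnotes_py_alt prev_list curr_list =
    pvFoldClassify (pvMkD prev_list) (pvMkD curr_list)
      (PySem.List.sorted
        (PySem.Set.union (PySem.Set.ofList (pvMkD prev_list).keys) (PySem.Set.ofList (pvMkD curr_list).keys))
        (fun x => x) false) ([], [], []) := by
  have hgoal : set_diff_pnotes_py_alt prev_list curr_list =
      pvMergeLoop (PySem.List.sorted (pvMkD prev_list).items (fun kv => kv.1) false)
        (PySem.List.sorted (pvMkD curr_list).items (fun kv => kv.1) false) ([], [], []) := rfl
  rw [hgoal]
  set d : PySem.Dict String (List (String × String)) := pvMkD prev_list with hd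
  set e : PySem.Dict String (List (String × String)) := pvMkD curr_list with he
  have hdnd : d.keys.Nodup := by
    rw [hd]
    exact PySem.Dict.nodup_keys_foldl_insert_key prev_list (fun p => pvGetD p "name" "") _ _
      PySem.Dict.nodup_keys_empty
  have hend : e.keys.Nodup := by
    rw [he]
    exact PySem.Dict.nodup_keys_foldl_insert_key curr_list (fun p => pvGetD p "name" "") _ _
      PySem.Dict.nodup_keys_empty
  set ps := PySem.List.sorted d.items (fun kv => kv.1) false with hps
  set cs := PySem.List.sorted e.items (fun kv => kv.1) false with hcs
  have hpsm : ∀ x, x ∈ ps ↔ x ∈ d.items := by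
    intro x; rw [hps]; exact PySem.List.mem_sorted _ _ _ _
  have hcsm : ∀ x, x ∈ cs ↔ x ∈ e.items := by
    intro x; rw [hcs]; exact PySem.List.mem_sorted _ _ _ _
  have hdkeys : d.keys = d.items.map (·.1) := by simp only [PySem.Dict.keys]
  have hekeys : e.keys = e.items.map (·.1) := by simp only [PySem.Dict.keys]
  have hpskeys : ∀ n, n ∈ ps.map (·.1) ↔ n ∈ d.keys := by
    intro n; rw [hdkeys, hps]
    exact ((PySem.List.sorted_perm d.items (fun kv => kv.1) false).map (·.1)).mem_iff
  have hcskeys : ∀ n, n ∈ cs.map (·.1) ↔ n ∈ e.keys := by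
    intro n; rw [hekeys, hcs]
    exact ((PySem.List.sorted_perm e.items (fun kv => kv.1) false).map (·.1)).mem_iff
  have hstrictp : (ps.map (·.1)).Pairwise (· < ·) := by
    rw [hps]; exact pv_sorted_items_strict d hdnd
  have hstrictc : (cs.map (·.1)).Pairwise (· < ·) := by
    rw [hcs]; exact pv_sorted_items_strict e hend
  rw [pv_merge_eq_fold d e ps cs hstrictp hstrictc
    (fun x hx => by
      obtain ⟨k, v⟩ := x
      exact PySem.Dict.get?_of_mem_items d ((hpsm _).mp hx) hdnd)
    (fun x hx => by
      obtain ⟨k, v⟩ := x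
      exact PySem.Dict.get?_of_mem_items e ((hcsm _).mp hx) hend)
    (fun x hx => by
      rcases hgd : d.get? x.1 with _ | v
      · exact Or.inl rfl
      · have hm : (x.1, v) ∈ d.items := PySem.Dict.mem_items_of_get?_eq_some d hgd
        exact Or.inr ((hpskeys x.1).mpr (@PySem.Dict.mem_keys_of_mem_items _ _ d (x.1, v) hm)))
    (fun x hx => by
      rcases hge : e.get? x.1 with _ | v
      · exact Or.inl rfl
      · have hm : (x.1, v) ∈ e.items := PySem.Dict.mem_items_of_get?_eq_some e hge
        exact Or.inr ((hcskeys x.1).mpr (@PySem.Dict.mem_keys_of_mem_items _ _ e (x.1, v) hm))) ([], [], [])]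
  congr 1
  have hmergestrict : (pvKeyMerge (ps.map (·.1)) (cs.map (·.1))).Pairwise (· < ·) :=
    pv_pairwise_keyMerge _ _ hstrictp hstrictc
  have hmergend : (pvKeyMerge (ps.map (·.1)) (cs.map (·.1))).Nodup :=
    hmergestrict.imp ne_of_lt
  symm
  apply PySem.List.sorted_eq_of_perm_of_pairwise_lt
  · apply (List.perm_ext_iff_of_nodup hmergend
      (PySem.Set.nodup_union _ _ (PySem.Set.nodup_ofList _))).mpr
    intro n
    rw [pv_mem_keyMerge, PySem.Set.mem_union, PySem.Set.mem_ofList, PySem.Set.mem_ofList,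
      hpskeys, hcskeys]
  · exact hmergestrict

-- ===== VERDICT (by name: the statement is the Claim_ definition above) =====
theorem set_diff_pnotes_py_spec : Claim_equal_set_diff_pnotes_py := by
  intro prev_list curr_list _
  unfold Spec_set_diff_pnotes_py
  rw [pv_A_eq_fold, pv_B_eq_fold]
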